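-- pv_equiv track=rewrite | github.com/acikyazilimagi/duplicate-info-detection | findsimilarity.py | dis
-- ===== SOURCE A (Python) =====
-- from collections import Counter
--
-- def dis( s1: str, s2: str ) -> str:
--     '''
--     Does:
--     '''
--     s1 = list(s1)
--     s2 = list(s2)
--     s1 = dict(Counter(s1))
--     s2 = dict(Counter(s2))
--
--     s1 = list(s1.keys())
--     s2 = list(s2.keys())
--
--     intersection = list(set(s1).intersection(set(s2)))
--     s1 = [i for i in s1 if i not in intersection]
--     s2 = [i for i in s2 if i not in intersection]
--
--     s1 = s1 + s2
--     s1 = "".join(s1)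
--
--     cost = 0
--
--     for s in s1:
--         if s in ['.', ',', ';', ':', '/', '-', ' ']:
--             cost = cost + 0
--         else:
--             cost += 1
--
--     return cost
-- ===== SOURCE B (Python) =====
-- def dis(s1, s2):
--     punct = {'.', ',', ';', ':', '/', '-', ' '}
--     cost = 0
--     for c in set(s1) | set(s2):
--         if (c in s1) != (c in s2) and c not in punct:
--             cost += 1
--     return cost
-- ===== Notes on version B (the rewrite author's own statement) =====
-- stated objective: simpler
-- what changed: Replaces A's pipeline (Counter keys, set intersection, two list-membership filter comprehensions, concatenation, join, counting loop) with one pass over the union of the two character sets, counting characters whose membership differs between the strings (XOR) and which are not in the punctuation set.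
import Mathlib
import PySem

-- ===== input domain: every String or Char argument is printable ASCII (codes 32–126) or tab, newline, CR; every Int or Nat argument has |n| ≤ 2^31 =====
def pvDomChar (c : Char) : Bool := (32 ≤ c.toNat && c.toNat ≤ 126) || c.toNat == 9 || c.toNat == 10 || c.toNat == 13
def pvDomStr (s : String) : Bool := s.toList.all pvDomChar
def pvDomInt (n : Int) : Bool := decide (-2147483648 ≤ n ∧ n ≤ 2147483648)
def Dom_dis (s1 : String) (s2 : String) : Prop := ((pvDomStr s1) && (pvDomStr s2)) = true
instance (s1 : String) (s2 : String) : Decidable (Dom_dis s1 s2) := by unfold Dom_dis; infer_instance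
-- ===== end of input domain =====

-- B replaces A's Counter/intersection/filter/concatenate/count pipeline with one pass over the
-- union of the two character sets counting membership-XOR non-punctuation characters (simpler).

-- ===== PORT A =====
-- the punctuation list A tests membership in
def pyPunctA : List Char := ['.', ',', ';', ':', '/', '-', ' ']

def dis (s1 : String) (s2 : String) : Int :=
  let l1 := s1.toList                                -- s1 = list(s1)
  let l2 := s2.toList                                -- s2 = list(s2)
  let k1 := (PySem.Dict.counter l1).keys             -- s1 = list(dict(Counter(s1)).keys())
  let k2 := (PySem.Dict.counter l2).keys
  -- intersection = list(set(s1).intersection(set(s2))) — only membership-tested below, order-safe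
  let inter := PySem.Set.inter (PySem.Set.ofList k1) (PySem.Set.ofList k2)
  let r1 := k1.filter (fun i => !(PySem.Set.contains inter i))
  let r2 := k2.filter (fun i => !(PySem.Set.contains inter i))
  let joined := r1 ++ r2                             -- s1 = s1 + s2; "".join(s1)
  joined.foldl (fun cost s => if pyPunctA.contains s then cost + 0 else cost + 1) 0

-- ===== PORT B =====
-- punct = {'.', ',', ';', ':', '/', '-', ' '}
def pyPunctB : PySem.Set Char := PySem.Set.ofList ['.', ',', ';', ':', '/', '-', ' ']

def dis_alt (s1 : String) (s2 : String) : Int :=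
  let l1 := s1.toList
  let l2 := s2.toList
  -- for c in set(s1) | set(s2): cost summed, order-independent
  (PySem.Set.union (PySem.Set.ofList l1) (PySem.Set.ofList l2)).foldl
    (fun cost c =>
      if (l1.contains c != l2.contains c) && !(PySem.Set.contains pyPunctB c)
      then cost + 1 else cost) 0

-- ===== PRECONDITION & SPEC =====
def Spec_dis (s1 : String) (s2 : String) (out : Int) : Prop := out = dis_alt s1 s2
instance (s1 : String) (s2 : String) (out : Int) : Decidable (Spec_dis s1 s2 out) := by unfold Spec_dis; infer_instance

-- ===== CLAIM (what is proved, stated in full; the proofs are below) =====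
def Claim_equal_dis : Prop := ∀ (s1 : String) (s2 : String), Dom_dis s1 s2 → Spec_dis s1 s2 (dis s1 s2)

-- ===== LEMMAS AND PROOFS =====

-- A's counting loop adds 0 on punctuation, 1 otherwise: it is countP of non-punctuation.
theorem dis_foldl_eq_countP (l : List Char) :
    l.foldl (fun cost s => if pyPunctA.contains s then cost + 0 else cost + 1) 0
      = (l.countP (fun s => !pyPunctA.contains s) : Int) := by
  have h : (fun (cost : Int) (s : Char) => if pyPunctA.contains s then cost + 0 else cost + 1)
      = fun cost s => if (!pyPunctA.contains s) = true then cost + 1 else cost := by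
    funext cost s
    by_cases hs : pyPunctA.contains s <;> simp_all
  rw [h, PySem.List.foldl_count_if]
  simp

-- B's loop is countP of its guard over the union set.
theorem dis_alt_foldl_eq_countP (l1 l2 : List Char) (u : List Char) :
    u.foldl (fun cost c =>
        if (l1.contains c != l2.contains c) && !(PySem.Set.contains pyPunctB c)
        then cost + 1 else cost) 0
      = (u.countP (fun c => (l1.contains c != l2.contains c)
            && !(PySem.Set.contains pyPunctB c)) : Int) := by
  rw [PySem.List.foldl_count_if]
  simp

-- the two deduplicated symmetric-difference lists are permutations of each other
theorem symmdiff_perm (l1 l2 : List Char) :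
    ((PySem.Set.ofList l1).filter
        (fun i => !(PySem.Set.contains (PySem.Set.inter (PySem.Set.ofList l1) (PySem.Set.ofList l2)) i))
      ++ (PySem.Set.ofList l2).filter
        (fun i => !(PySem.Set.contains (PySem.Set.inter (PySem.Set.ofList l1) (PySem.Set.ofList l2)) i))).Perm
    ((PySem.Set.union (PySem.Set.ofList l1) (PySem.Set.ofList l2)).filter
        (fun c => l1.contains c != l2.contains c)) := by
  have hI : ∀ a : Char,
      PySem.Set.contains (PySem.Set.inter (PySem.Set.ofList l1) (PySem.Set.ofList l2)) a = true
        ↔ a ∈ l1 ∧ a ∈ l2 := by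
    intro a
    rw [show PySem.Set.contains (PySem.Set.inter (PySem.Set.ofList l1) (PySem.Set.ofList l2)) a
        = List.contains (PySem.Set.inter (PySem.Set.ofList l1) (PySem.Set.ofList l2)) a from rfl,
      List.contains_iff_mem, PySem.Set.mem_inter]
    simp [PySem.Set.mem_ofList]
  apply (List.perm_ext_iff_of_nodup ?_ ?_).mpr
  · intro a
    simp only [List.mem_append, List.mem_filter, PySem.Set.mem_ofList, PySem.Set.mem_union]
    have e1 : l1.contains a = true ↔ a ∈ l1 := List.contains_iff_mem
    have e2 : l2.contains a = true ↔ a ∈ l2 := List.contains_iff_mem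
    cases hc1 : l1.contains a <;> cases hc2 : l2.contains a <;>
      simp_all
  · apply List.Nodup.append
    · exact (PySem.Set.nodup_ofList l1).filter _
    · exact (PySem.Set.nodup_ofList l2).filter _
    · intro a ha hb
      simp only [List.mem_filter, PySem.Set.mem_ofList, Bool.not_eq_eq_eq_not, Bool.not_true] at ha hb
      have := (hI a).mpr ⟨ha.1, hb.1⟩
      rw [ha.2] at this
      exact absurd this (by simp)
  · exact ((PySem.Set.nodup_union _ _ (PySem.Set.nodup_ofList l1))).filter _

theorem dis_spec_aux (s1 s2 : String) : dis s1 s2 = dis_alt s1 s2 := by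
  unfold dis dis_alt
  simp only [PySem.Dict.keys_counter,
    PySem.Set.ofList_eq_self_of_nodup _ (PySem.Set.nodup_ofList s1.toList),
    PySem.Set.ofList_eq_self_of_nodup _ (PySem.Set.nodup_ofList s2.toList)]
  rw [dis_foldl_eq_countP, dis_alt_foldl_eq_countP]
  rw [(symmdiff_perm s1.toList s2.toList).countP_eq]
  rw [List.countP_filter]
  have hPB : pyPunctB = pyPunctA := by rfl
  rw [hPB]
  congr 1
  apply List.countP_congr
  intro a _
  simp [PySem.Set.contains, Bool.and_comm]

-- ===== VERDICT (by name: the statement is the Claim_ definition above) =====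
theorem dis_spec : Claim_equal_dis := by
  intro s1 s2 _
  unfold Spec_dis
  exact dis_spec_aux s1 s2
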